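-- pv_equiv track=rewrite | github.com/tarekul/AlgoMonster | binary_search/newspapers.py | newspapers_split
-- ===== SOURCE A (Python) =====
-- from typing import List
--
-- def feasible(newspapers_read_times: List[int], num_coworkers: int, limit: int) -> bool:
--     time, num_workers = 0, 1
--
--     for read_time in newspapers_read_times:
--         if read_time + time > limit:
--             time = 0
--             num_workers += 1
--         time += read_time
--
--     return num_workers <= num_coworkers
--
-- def newspapers_split(newspapers_read_times: List[int], num_coworkers: int) -> int:
--     low, high = max(newspapers_read_times), sum(newspapers_read_times)
--     ans = -1
--     while low <= high:
--         mid = (low + high) // 2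
--         # helper function to check if a time works
--         if feasible(newspapers_read_times, num_coworkers, mid):
--             ans = mid
--             high = mid - 1
--         else:
--             low = mid + 1
--     return ans
-- ===== SOURCE B (Python) =====
-- from typing import List
--
-- def newspapers_split(newspapers_read_times: List[int], num_coworkers: int) -> int:
--     if num_coworkers < 1:
--         return -1
--     n = len(newspapers_read_times)
--     prefix = [0]
--     for t in newspapers_read_times:
--         prefix.append(prefix[-1] + t)
--     dp = prefix[:]  # one worker: dp[i] = total reading time of the first i papers
--     for _ in range(2, min(num_coworkers, n) + 1):
--         dp = [min(max(dp[j], prefix[i] - prefix[j]) for j in range(i + 1))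
--               for i in range(n + 1)]
--     return dp[n]
-- ===== Notes on version B (the rewrite author's own statement) =====
-- stated objective: alternative
-- what changed: Replaces binary search over the answer range with a greedy feasibility test by an exact dynamic program over prefix sums: dp[w][i] = min over split points j of max(dp[w-1][j], prefix[i]-prefix[j]), answer dp[min(k,n)][n].
-- outside the precondition, e.g. on newspapers_split([8, 1, -5], 2): A returns -1, B returns 4; on newspapers_split([], 1): A raises ValueError, B returns 0
import Mathlib
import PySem

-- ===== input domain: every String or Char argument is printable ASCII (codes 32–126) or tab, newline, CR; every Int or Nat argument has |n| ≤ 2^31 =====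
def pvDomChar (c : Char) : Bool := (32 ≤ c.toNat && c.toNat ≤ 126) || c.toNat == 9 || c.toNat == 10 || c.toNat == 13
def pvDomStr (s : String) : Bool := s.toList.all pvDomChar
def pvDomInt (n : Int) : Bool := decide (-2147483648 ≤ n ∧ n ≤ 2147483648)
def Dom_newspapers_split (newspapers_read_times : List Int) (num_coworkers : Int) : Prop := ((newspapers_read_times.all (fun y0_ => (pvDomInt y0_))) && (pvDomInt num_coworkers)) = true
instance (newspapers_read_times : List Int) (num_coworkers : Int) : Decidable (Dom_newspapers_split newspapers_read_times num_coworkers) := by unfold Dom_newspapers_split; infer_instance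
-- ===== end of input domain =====

-- B replaces A's binary search over the answer with an exact DP over prefix sums (alternative algorithm, not faster);
-- equivalence is claimed on nonempty lists of nonnegative read times.

-- ===== PORT A =====
def pvFeasible (newspapers_read_times : List Int) (num_coworkers : Int) (limit : Int) : Bool :=
  let st := newspapers_read_times.foldl
    (fun (p : Int × Int) read_time =>
      if read_time + p.1 > limit then (read_time, p.2 + 1) else (p.1 + read_time, p.2)) (0, 1)
  decide (st.2 ≤ num_coworkers)

def pvBS (newspapers_read_times : List Int) (num_coworkers : Int) (low high ans : Int) : Int :=
  if h : low ≤ high then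
    let mid := PySem.Int.floordiv (low + high) 2
    if pvFeasible newspapers_read_times num_coworkers mid then
      pvBS newspapers_read_times num_coworkers low (mid - 1) mid
    else
      pvBS newspapers_read_times num_coworkers (mid + 1) high ans
  else ans
termination_by (high + 1 - low).toNat
decreasing_by
  · have := PySem.Int.floordiv_two_mid_bounds h; omega
  · have := PySem.Int.floordiv_two_mid_bounds h; omega

def newspapers_split (newspapers_read_times : List Int) (num_coworkers : Int) : Int :=
  let low := (PySem.List.max? newspapers_read_times (fun y => y)).getD 0   -- max() raises on []; excluded by Pre_
  let high := newspapers_read_times.sum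
  pvBS newspapers_read_times num_coworkers low high (-1)

-- ===== PORT B =====
-- prefix = [0]; for t in xs: prefix.append(prefix[-1] + t)
def pvPrefix (xs : List Int) : List Int :=
  xs.foldl (fun ps t => ps ++ [ps.getLast! + t]) [0]

-- dp = [min(max(dp[j], prefix[i]-prefix[j]) for j in range(i+1)) for i in range(n+1)]
def pvStep (pre : List Int) (n : Nat) (dp : List Int) : List Int :=
  (List.range (n + 1)).map (fun i =>
    ((PySem.List.min? ((List.range (i + 1)).map
        (fun j => max (dp.getD j 0) (pre.getD i 0 - pre.getD j 0))) (fun y => y)).getD 0))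

def newspapers_split_alt (newspapers_read_times : List Int) (num_coworkers : Int) : Int :=
  if num_coworkers < 1 then -1
  else
    let n := newspapers_read_times.length
    let pre := pvPrefix newspapers_read_times
    let dp := (List.range (min num_coworkers (n : Int) - 1).toNat).foldl
      (fun dp _ => pvStep pre n dp) pre
    dp.getD n 0

-- ===== PRECONDITION & SPEC =====
-- Pre_ excludes the empty list, on which A raises ValueError (max() of an empty sequence), and — when
-- num_coworkers ≥ 1 — lists containing a negative read time: negative times are outside the problem's
-- natural domain, and there A's binary search runs on a non-monotone feasibility predicate, so its value
-- is an artefact of the probe path (e.g. A returns -1 on ([8, 1, -5], 2)); with num_coworkers < 1 both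
-- programs return -1 whatever the times, so those inputs stay admitted.
def Pre_newspapers_split (newspapers_read_times : List Int) (num_coworkers : Int) : Prop :=
  newspapers_read_times ≠ [] ∧ (num_coworkers < 1 ∨ ∀ x ∈ newspapers_read_times, 0 ≤ x)
instance (newspapers_read_times : List Int) (num_coworkers : Int) : Decidable (Pre_newspapers_split newspapers_read_times num_coworkers) := by unfold Pre_newspapers_split; infer_instance

def pvWitness_newspapers_split : List Int × Int := ([1, 2, 3], 2)

def Spec_newspapers_split (newspapers_read_times : List Int) (num_coworkers : Int) (out : Int) : Prop := out = newspapers_split_alt newspapers_read_times num_coworkers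
instance (newspapers_read_times : List Int) (num_coworkers : Int) (out : Int) : Decidable (Spec_newspapers_split newspapers_read_times num_coworkers out) := by unfold Spec_newspapers_split; infer_instance

-- ===== CLAIM (what is proved, stated in full; the proofs are below) =====
def Claim_equal_newspapers_split : Prop := ∀ (newspapers_read_times : List Int) (num_coworkers : Int), Dom_newspapers_split newspapers_read_times num_coworkers → Pre_newspapers_split newspapers_read_times num_coworkers → Spec_newspapers_split newspapers_read_times num_coworkers (newspapers_split newspapers_read_times num_coworkers)

-- ===== LEMMAS AND PROOFS =====

-- the loop body of A's feasibility fold, under a name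
def pvGstep (limit : Int) (p : Int × Int) (x : Int) : Int × Int :=
  if x + p.1 > limit then (x, p.2 + 1) else (p.1 + x, p.2)

theorem pvFeasible_eq (xs : List Int) (k limit : Int) :
    pvFeasible xs k limit = decide ((xs.foldl (pvGstep limit) (0, 1)).2 ≤ k) := rfl

-- sum of the first i read times
def pvP (xs : List Int) (i : Nat) : Int := (xs.take i).sum

-- "the first i papers can be split into w contiguous blocks each of total time ≤ L"
def pvCan (xs : List Int) : Nat → Nat → Int → Prop
  | 0, i, _ => i = 0
  | w + 1, i, L => ∃ j, j ≤ i ∧ pvCan xs w j L ∧ pvP xs i - pvP xs j ≤ L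

theorem pvCan_mono_L (xs : List Int) (w : Nat) :
    ∀ (i : Nat) (L L' : Int), pvCan xs w i L → L ≤ L' → pvCan xs w i L' := by
  induction w with
  | zero => intro i L L' h _; exact h
  | succ w ih =>
    rintro i L L' ⟨j, hj, hc, hs⟩ hLL
    exact ⟨j, hj, ih j L L' hc hLL, le_trans hs hLL⟩

theorem pvCan_zero (xs : List Int) (w : Nat) (L : Int) (hL : 0 ≤ L) : pvCan xs w 0 L := by
  induction w with
  | zero => rfl
  | succ w ih => exact ⟨0, le_refl 0, ih, by simpa using hL⟩

theorem pvCan_succ_self (xs : List Int) (w i : Nat) (L : Int) (hL : 0 ≤ L)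
    (h : pvCan xs w i L) : pvCan xs (w + 1) i L :=
  ⟨i, le_refl i, h, by simpa using hL⟩

theorem pvCan_mono_w (xs : List Int) (w w' i : Nat) (L : Int) (hL : 0 ≤ L)
    (hww : w ≤ w') (h : pvCan xs w i L) : pvCan xs w' i L := by
  induction w' with
  | zero => exact (Nat.le_zero.mp hww) ▸ h
  | succ w' ih =>
    rcases Nat.lt_or_ge w (w' + 1) with hlt | hge
    · exact pvCan_succ_self xs w' i L hL (ih (Nat.lt_succ_iff.mp hlt))
    · exact (Nat.le_antisymm hww hge) ▸ h

theorem pvP_take_take (xs : List Int) (j i : Nat) (hj : j ≤ i) :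
    (xs.take i).take j = xs.take j := by
  rw [List.take_take, Nat.min_eq_left hj]

theorem pvP_diff (xs : List Int) (j i : Nat) (hj : j ≤ i) :
    ((xs.take i).drop j).sum = pvP xs i - pvP xs j := by
  have h := List.take_append_drop j (xs.take i)
  have : pvP xs i = ((xs.take i).take j).sum + ((xs.take i).drop j).sum := by
    unfold pvP; rw [← List.sum_append, h]
  rw [pvP_take_take xs j i hj] at this
  unfold pvP at *; omega

theorem pvTake_split (xs : List Int) (j i : Nat) (hj : j ≤ i) :
    xs.take i = xs.take j ++ (xs.take i).drop j := by
  conv_lhs => rw [← List.take_append_drop j (xs.take i)]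
  rw [pvP_take_take xs j i hj]

theorem pvCan_elem_le (xs : List Int) (hnn : ∀ x ∈ xs, 0 ≤ x) (w : Nat) :
    ∀ (i : Nat) (L : Int), pvCan xs w i L → ∀ x ∈ xs.take i, x ≤ L := by
  induction w with
  | zero => intro i L h x hx; subst h; simp at hx
  | succ w ih =>
    rintro i L ⟨j, hj, hc, hs⟩ x hx
    rw [pvTake_split xs j i hj, List.mem_append] at hx
    rcases hx with hx | hx
    · exact ih j L hc x hx
    · have h1 : x ≤ ((xs.take i).drop j).sum := by
        refine List.single_le_sum ?_ x hx
        intro y hy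
        exact hnn y (List.mem_of_mem_take (List.mem_of_mem_drop hy))
      rw [pvP_diff xs j i hj] at h1
      omega

-- greedy run over a segment that never overflows
theorem pvRun_no_reset (L : Int) :
    ∀ (ys : List Int) (t u : Int), (∀ x ∈ ys, 0 ≤ x) → t + ys.sum ≤ L →
      ys.foldl (pvGstep L) (t, u) = (t + ys.sum, u) := by
  intro ys
  induction ys with
  | nil => intro t u _ _; simp
  | cons x rest ih =>
    intro t u hnn hsum
    have hrest : (0:Int) ≤ rest.sum :=
      List.sum_nonneg (fun y hy => hnn y (List.mem_cons_of_mem x hy))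
    have hx : ¬ (x + t > L) := by
      simp only [List.sum_cons] at hsum; omega
    simp only [List.foldl_cons, pvGstep, hx, if_false]
    rw [ih (t + x) u (fun y hy => hnn y (List.mem_cons_of_mem x hy)) (by simp only [List.sum_cons] at hsum; omega)]
    simp only [List.sum_cons]; ring_nf

-- greedy over one block: at most one reset, and a reset forces the block budget over L
theorem pvRun_seg (L : Int) :
    ∀ (ys : List Int) (t u : Int), (∀ x ∈ ys, 0 ≤ x) → ys.sum ≤ L → 0 ≤ t → t ≤ L →
      0 ≤ (ys.foldl (pvGstep L) (t, u)).1 ∧ (ys.foldl (pvGstep L) (t, u)).1 ≤ L ∧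
      (((ys.foldl (pvGstep L) (t, u)).2 = u ∧ (ys.foldl (pvGstep L) (t, u)).1 = t + ys.sum) ∨
       ((ys.foldl (pvGstep L) (t, u)).2 = u + 1 ∧ 0 < (ys.foldl (pvGstep L) (t, u)).1 ∧ L < t + ys.sum)) := by
  intro ys
  induction ys with
  | nil => intro t u _ _ h0 hL; simp [h0, hL]
  | cons x rest ih =>
    intro t u hnn hsum h0 hL
    have hxnn : (0:Int) ≤ x := hnn x List.mem_cons_self
    have hrnn : ∀ y ∈ rest, (0:Int) ≤ y := fun y hy => hnn y (List.mem_cons_of_mem x hy)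
    have hrsum : (0:Int) ≤ rest.sum := List.sum_nonneg hrnn
    simp only [List.sum_cons] at hsum
    by_cases hreset : x + t > L
    · simp only [List.foldl_cons, pvGstep]
      rw [if_pos hreset, pvRun_no_reset L rest x (u + 1) hrnn (by omega)]
      refine ⟨by omega, by omega, Or.inr ⟨rfl, by omega, by simp only [List.sum_cons]; omega⟩⟩
    · simp only [List.foldl_cons, pvGstep]
      rw [if_neg hreset]
      have := ih (t + x) u hrnn (by omega) (by omega) (by omega)
      rcases this with ⟨ha, hb, hc⟩
      refine ⟨ha, hb, ?_⟩
      rcases hc with ⟨h1, h2⟩ | ⟨h1, h2, h3⟩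
      · exact Or.inl ⟨h1, by rw [h2]; simp only [List.sum_cons]; ring⟩
      · exact Or.inr ⟨h1, h2, by simp only [List.sum_cons]; omega⟩

-- a certificate for the first i papers bounds the greedy state
theorem pvCan_to_greedy (xs : List Int) (L : Int) (hnn : ∀ x ∈ xs, 0 ≤ x) (hL : 0 ≤ L) (w : Nat) :
    ∀ (i : Nat), pvCan xs w i L →
      0 ≤ ((xs.take i).foldl (pvGstep L) (0, 1)).1 ∧
      ((xs.take i).foldl (pvGstep L) (0, 1)).1 ≤ L ∧
      ((xs.take i).foldl (pvGstep L) (0, 1)).2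
        + (if 0 < ((xs.take i).foldl (pvGstep L) (0, 1)).1 then 1 else 0) ≤ (w : Int) + 1 ∧
      (2 ≤ ((xs.take i).foldl (pvGstep L) (0, 1)).2 → 0 < ((xs.take i).foldl (pvGstep L) (0, 1)).1) := by
  induction w with
  | zero =>
    intro i h
    subst h
    simp [hL]
  | succ w ih =>
    rintro i ⟨j, hj, hc, hs⟩
    obtain ⟨ih0, ih1, ih2, ih3⟩ := ih j hc
    have hsplit := pvTake_split xs j i hj
    have hsegnn : ∀ x ∈ (xs.take i).drop j, (0:Int) ≤ x := by
      intro y hy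
      exact hnn y (List.mem_of_mem_take (List.mem_of_mem_drop hy))
    have hsegsum : ((xs.take i).drop j).sum ≤ L := by rw [pvP_diff xs j i hj]; exact hs
    have hfold : (xs.take i).foldl (pvGstep L) (0, 1)
        = ((xs.take i).drop j).foldl (pvGstep L) ((xs.take j).foldl (pvGstep L) (0, 1)) := by
      conv_lhs => rw [hsplit]
      rw [List.foldl_append]
    obtain ⟨hr0, hr1, hr2⟩ := pvRun_seg L ((xs.take i).drop j)
      ((xs.take j).foldl (pvGstep L) (0, 1)).1 ((xs.take j).foldl (pvGstep L) (0, 1)).2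
      hsegnn hsegsum ih0 ih1
    rw [hfold]
    have hsegnng : (0:Int) ≤ ((xs.take i).drop j).sum := List.sum_nonneg hsegnn
    rcases hr2 with ⟨h1, h2⟩ | ⟨h1, h2, h3⟩
    · refine ⟨hr0, hr1, ?_, ?_⟩
      · rw [h1]
        split_ifs at ih2 ⊢ <;> push_cast <;> omega
      · intro h2u
        rw [h1] at h2u
        have := ih3 h2u
        rw [h2]
        omega
    · have htpos : 0 < ((xs.take j).foldl (pvGstep L) (0, 1)).1 := by omega
      rw [if_pos htpos] at ih2
      refine ⟨hr0, hr1, ?_, fun _ => h2⟩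
      rw [h1, if_pos h2]
      push_cast at ih2 ⊢
      omega

-- the greedy state yields a certificate with its own worker count
theorem pvGreedy_to_can (xs : List Int) (L : Int) (hnn : ∀ x ∈ xs, 0 ≤ x)
    (hub : ∀ x ∈ xs, x ≤ L) (hL : 0 ≤ L) :
    ∀ (i : Nat), i ≤ xs.length →
      ∃ (w : Nat) (j : Nat), j ≤ i ∧ ((xs.take i).foldl (pvGstep L) (0, 1)).2 = (w : Int) + 1 ∧
        pvCan xs w j L ∧ pvP xs i - pvP xs j = ((xs.take i).foldl (pvGstep L) (0, 1)).1 ∧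
        0 ≤ ((xs.take i).foldl (pvGstep L) (0, 1)).1 ∧
        ((xs.take i).foldl (pvGstep L) (0, 1)).1 ≤ L ∧ w + 1 ≤ max i 1 := by
  intro i
  induction i with
  | zero =>
    intro _
    exact ⟨0, 0, le_refl 0, by simp, rfl, by simp [pvP], by simp, by simp [hL], by simp⟩
  | succ i ih =>
    intro hi1
    have hi : i < xs.length := by omega
    obtain ⟨w, j, hj, hw, hc, hpt, h0, h1, hwb⟩ := ih (by omega)
    have htake : xs.take (i + 1) = xs.take i ++ [xs[i]] := by
      rw [List.take_add_one, List.getElem?_eq_getElem hi]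
      rfl
    have hxnn : (0:Int) ≤ xs[i] := hnn _ (List.getElem_mem hi)
    have hxub : xs[i] ≤ L := hub _ (List.getElem_mem hi)
    have hPsucc : pvP xs (i + 1) = pvP xs i + xs[i] := by
      unfold pvP
      rw [htake, List.sum_append]
      simp
    rw [htake, List.foldl_append]
    by_cases hreset : xs[i] + ((xs.take i).foldl (pvGstep L) (0, 1)).1 > L
    · -- a reset: i ≥ 1 because from t = 0 an element ≤ L cannot overflow
      have hipos : 1 ≤ i := by
        by_contra h
        have hi0 : i = 0 := by omega
        subst hi0
        simp at h0 h1 hreset hpt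
        simp [pvP] at hpt
        omega
      refine ⟨w + 1, i, by omega, ?_, ⟨j, hj, hc, by omega⟩, ?_, ?_, ?_, ?_⟩
      · simp only [List.foldl_cons, List.foldl_nil, pvGstep]
        rw [if_pos hreset, hw]
        push_cast; ring
      · simp only [List.foldl_cons, List.foldl_nil, pvGstep]
        rw [if_pos hreset]
        simp [hPsucc]
      · simp only [List.foldl_cons, List.foldl_nil, pvGstep]
        rw [if_pos hreset]
        exact hxnn
      · simp only [List.foldl_cons, List.foldl_nil, pvGstep]
        rw [if_pos hreset]
        exact hxub
      · have : w + 1 ≤ i := by omega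
        omega
    · refine ⟨w, j, by omega, ?_, hc, ?_, ?_, ?_, by omega⟩
      · simp only [List.foldl_cons, List.foldl_nil, pvGstep]
        rw [if_neg hreset, hw]
      · simp only [List.foldl_cons, List.foldl_nil, pvGstep]
        rw [if_neg hreset]
        simp only []
        omega
      · simp only [List.foldl_cons, List.foldl_nil, pvGstep]
        rw [if_neg hreset]
        simp only []
        omega
      · simp only [List.foldl_cons, List.foldl_nil, pvGstep]
        rw [if_neg hreset]
        simp only []
        omega

theorem pvPrefix_aux :
    ∀ (l acc : List Int) (c : Int),
      l.foldl (fun ps t => ps ++ [ps.getLast! + t]) (acc ++ [c])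
        = acc ++ (List.range (l.length + 1)).map (fun i => c + (l.take i).sum) := by
  intro l
  induction l with
  | nil => intro acc c; simp
  | cons x rest ih =>
    intro acc c
    simp only [List.foldl_cons]
    have hlast : (acc ++ [c]).getLast! = c := by
      simp [List.getLast!_eq_getLast?_getD]
    rw [hlast, ih (acc ++ [c]) (c + x)]
    simp only [List.length_cons, List.range_succ_eq_map, List.map_cons, List.map_map,
      List.take_zero, List.sum_nil, add_zero, List.take_succ_cons, List.sum_cons,
      List.append_assoc, List.singleton_append, Function.comp_def]
    congr 3
    apply List.map_congr_left
    intro a _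
    ring

theorem pvGetD_map_range (f : Nat → Int) (n i : Nat) (hi : i < n) :
    ((List.range n).map f).getD i 0 = f i := by
  rw [List.getD_eq_getElem?_getD]
  simp [hi]

theorem pvPrefix_eq (xs : List Int) :
    pvPrefix xs = (List.range (xs.length + 1)).map (fun i => pvP xs i) := by
  unfold pvPrefix
  have h := pvPrefix_aux xs [] 0
  simp only [List.nil_append] at h
  rw [h]
  apply List.map_congr_left
  intro a _
  simp [pvP]

theorem pvPrefix_getD (xs : List Int) (i : Nat) (hi : i ≤ xs.length) :
    (pvPrefix xs).getD i 0 = pvP xs i := by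
  rw [pvPrefix_eq, pvGetD_map_range _ _ _ (by omega)]

theorem pvMin_spec (l : List Int) (hl : l ≠ []) :
    (PySem.List.min? l (fun y => y)).getD 0 ∈ l ∧
      ∀ y ∈ l, (PySem.List.min? l (fun y => y)).getD 0 ≤ y := by
  rcases h : PySem.List.min? l (fun y => y) with _ | m
  · exact absurd ((PySem.List.min?_eq_none_iff l (fun y => y)).mp h) hl
  · exact ⟨PySem.List.min?_mem h, fun y hy => PySem.List.min?_isMin h y hy⟩

-- dp is, rowwise, the least budget L admitting a certificate with w blocks
def pvDPok (xs : List Int) (d : List Int) (w : Nat) : Prop :=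
  ∀ i ≤ xs.length, pvCan xs w i (d.getD i 0) ∧ ∀ L, pvCan xs w i L → d.getD i 0 ≤ L

theorem pvDPok_base (xs : List Int) : pvDPok xs (pvPrefix xs) 1 := by
  intro i hi
  rw [pvPrefix_getD xs i hi]
  constructor
  · exact ⟨0, Nat.zero_le i, rfl, by simp [pvP]⟩
  · rintro L ⟨j, hj, hj0, hs⟩
    have : j = 0 := hj0
    subst this
    simp only [pvP, List.take_zero, List.sum_nil, sub_zero] at hs
    exact hs

theorem pvDPok_step (xs : List Int) (d : List Int) (w : Nat) (h : pvDPok xs d w) :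
    pvDPok xs (pvStep (pvPrefix xs) xs.length d) (w + 1) := by
  intro i hi
  have hlen : ((List.range (i + 1)).map
      (fun j => max (d.getD j 0) ((pvPrefix xs).getD i 0 - (pvPrefix xs).getD j 0))) ≠ [] := by
    simp [List.range_succ]
  set f := fun j => max (d.getD j 0) ((pvPrefix xs).getD i 0 - (pvPrefix xs).getD j 0) with hf
  have hval : (pvStep (pvPrefix xs) xs.length d).getD i 0
      = (PySem.List.min? ((List.range (i + 1)).map f) (fun y => y)).getD 0 := by
    unfold pvStep
    rw [pvGetD_map_range _ _ _ (by omega)]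
  obtain ⟨hmem, hmin⟩ := pvMin_spec _ hlen
  rw [← hval] at hmem hmin
  constructor
  · -- the dp value itself admits a certificate
    rcases List.mem_map.mp hmem with ⟨j, hjr, hjv⟩
    have hj : j ≤ i := by
      have := List.mem_range.mp hjr
      omega
    have hCd : pvCan xs w j (d.getD j 0) := (h j (by omega)).1
    refine ⟨j, hj, ?_, ?_⟩
    · apply pvCan_mono_L xs w j (d.getD j 0) _ hCd
      rw [← hjv, hf]
      simp
    · have h1 : (pvPrefix xs).getD i 0 = pvP xs i := pvPrefix_getD xs i hi
      have h2 : (pvPrefix xs).getD j 0 = pvP xs j := pvPrefix_getD xs j (by omega)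
      rw [← hjv, hf]
      simp only [h1, h2]
      exact le_max_right _ _
  · rintro L ⟨j, hj, hC, hs⟩
    have hdj : d.getD j 0 ≤ L := (h j (by omega)).2 L hC
    have : f j ≤ L := by
      have h1 : (pvPrefix xs).getD i 0 = pvP xs i := pvPrefix_getD xs i hi
      have h2 : (pvPrefix xs).getD j 0 = pvP xs j := pvPrefix_getD xs j (by omega)
      rw [hf]
      simp only [h1, h2, max_le_iff]
      exact ⟨hdj, hs⟩
    refine le_trans (hmin (f j) ?_) this
    exact List.mem_map.mpr ⟨j, List.mem_range.mpr (by omega), rfl⟩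

theorem pvDPok_iters (xs : List Int) (s : Nat) :
    pvDPok xs ((List.range s).foldl (fun d _ => pvStep (pvPrefix xs) xs.length d) (pvPrefix xs))
      (s + 1) := by
  induction s with
  | zero => exact pvDPok_base xs
  | succ s ih =>
    rw [List.range_succ, List.foldl_append]
    exact pvDPok_step xs _ _ ih

theorem pvWorkers_ge (L : Int) :
    ∀ (l : List Int) (t u : Int), u ≤ (l.foldl (pvGstep L) (t, u)).2 := by
  intro l
  induction l with
  | nil => intro t u; simp
  | cons x rest ih =>
    intro t u
    simp only [List.foldl_cons, pvGstep]
    by_cases hr : x + t > L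
    · rw [if_pos hr]
      exact le_trans (by omega) (ih x (u + 1))
    · rw [if_neg hr]
      exact ih (t + x) u

theorem pvFeasible_of_klt (xs : List Int) (k L : Int) (hk : k < 1) :
    pvFeasible xs k L = false := by
  rw [pvFeasible_eq]
  have h := pvWorkers_ge L xs 0 1
  simp only [decide_eq_false_iff_not]
  omega

theorem pvBS_false (xs : List Int) (k : Int) (hf : ∀ L, pvFeasible xs k L = false) :
    ∀ (n : Nat) (low high ans : Int), (high + 1 - low).toNat ≤ n →
      pvBS xs k low high ans = ans := by
  intro n
  induction n with
  | zero =>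
    intro low high ans hn
    rw [pvBS]
    have hlh : ¬ low ≤ high := by omega
    rw [dif_neg hlh]
  | succ n ih =>
    intro low high ans hn
    rw [pvBS]
    by_cases hlh : low ≤ high
    · rw [dif_pos hlh]
      show (if pvFeasible xs k (PySem.Int.floordiv (low + high) 2) then
          pvBS xs k low (PySem.Int.floordiv (low + high) 2 - 1) (PySem.Int.floordiv (low + high) 2)
        else pvBS xs k (PySem.Int.floordiv (low + high) 2 + 1) high ans) = ans
      have hmid := PySem.Int.floordiv_two_mid_bounds hlh
      rw [hf, if_neg (by simp)]
      exact ih _ _ _ (by omega)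
    · rw [dif_neg hlh]

theorem pvBS_thresh (xs : List Int) (k M mx : Int)
    (hthr : ∀ L, mx ≤ L → (pvFeasible xs k L = true ↔ M ≤ L)) :
    ∀ (n : Nat) (low high ans : Int), (high + 1 - low).toNat ≤ n →
      mx ≤ low → low ≤ M → (M ≤ high ∨ ans = M) → pvBS xs k low high ans = M := by
  intro n
  induction n with
  | zero =>
    intro low high ans hn hmx hlM h
    rw [pvBS]
    have hlh : ¬ low ≤ high := by omega
    rw [dif_neg hlh]
    rcases h with h | h
    · omega
    · exact h
  | succ n ih =>
    intro low high ans hn hmx hlM h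
    rw [pvBS]
    by_cases hlh : low ≤ high
    · rw [dif_pos hlh]
      show (if pvFeasible xs k (PySem.Int.floordiv (low + high) 2) then
          pvBS xs k low (PySem.Int.floordiv (low + high) 2 - 1) (PySem.Int.floordiv (low + high) 2)
        else pvBS xs k (PySem.Int.floordiv (low + high) 2 + 1) high ans) = M
      have hmid := PySem.Int.floordiv_two_mid_bounds hlh
      set mid := PySem.Int.floordiv (low + high) 2 with hmiddef
      by_cases hfeas : pvFeasible xs k mid = true
      · rw [if_pos hfeas]
        have hMmid : M ≤ mid := (hthr mid (by omega)).mp hfeas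
        exact ih low (mid - 1) mid (by omega) hmx hlM (by omega)
      · rw [if_neg hfeas]
        have hMmid : ¬ M ≤ mid := fun hMm => hfeas ((hthr mid (by omega)).mpr hMm)
        exact ih (mid + 1) high ans (by omega) (by omega) (by omega) h
    · rw [dif_neg hlh]
      rcases h with h | h
      · omega
      · exact h

-- ===== VERDICT (by name: the statement is the Claim_ definition above) =====
theorem newspapers_split_spec : Claim_equal_newspapers_split := by
  intro xs k _hdom hpre
  unfold Spec_newspapers_split
  obtain ⟨hne, hd⟩ := hpre
  by_cases hk : k < 1
  · have hB : newspapers_split_alt xs k = -1 := by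
      unfold newspapers_split_alt
      rw [if_pos hk]
    rw [hB]
    unfold newspapers_split
    exact pvBS_false xs k (fun L => pvFeasible_of_klt xs k L hk) _ _ _ _ le_rfl
  · have hk1 : (1:Int) ≤ k := by omega
    have hnn : ∀ x ∈ xs, 0 ≤ x := hd.resolve_left hk
    have hn1 : 1 ≤ xs.length := List.length_pos_of_ne_nil hne
    set steps := (min k (xs.length : Int) - 1).toNat with hsteps
    set M := ((List.range steps).foldl (fun d _ => pvStep (pvPrefix xs) xs.length d)
      (pvPrefix xs)).getD xs.length 0 with hM
    have hmin1 : 1 ≤ min k (xs.length : Int) := by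
      have : (1:Int) ≤ (xs.length : Int) := by exact_mod_cast hn1
      omega
    have hWint : ((steps + 1 : Nat) : Int) = min k (xs.length : Int) := by
      rw [hsteps]
      push_cast
      omega
    have hdp := pvDPok_iters xs steps
    have hMC : pvCan xs (steps + 1) xs.length M := (hdp xs.length le_rfl).1
    have hMle : ∀ L, pvCan xs (steps + 1) xs.length L → M ≤ L := (hdp xs.length le_rfl).2
    rcases hmax : PySem.List.max? xs (fun y => y) with _ | m
    · exact absurd ((PySem.List.max?_eq_none_iff xs (fun y => y)).mp hmax) hne
    have hmx_mem : m ∈ xs := PySem.List.max?_mem hmax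
    have hmx_ub : ∀ y ∈ xs, y ≤ m := fun y hy => PySem.List.max?_isMax hmax y hy
    have hmx0 : (0:Int) ≤ m := hnn m hmx_mem
    have hmxM : m ≤ M := by
      refine pvCan_elem_le xs hnn (steps + 1) xs.length M hMC m ?_
      rw [List.take_length]
      exact hmx_mem
    have hsum0 : (0:Int) ≤ xs.sum := List.sum_nonneg hnn
    have hP0 : pvP xs 0 = 0 := by simp [pvP]
    have hPn : pvP xs xs.length = xs.sum := by unfold pvP; rw [List.take_length]
    have hMS : M ≤ xs.sum := by
      refine hMle xs.sum ⟨0, Nat.zero_le _, pvCan_zero xs steps xs.sum hsum0, ?_⟩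
      rw [hP0, hPn]
      omega
    have hthr : ∀ L, m ≤ L → (pvFeasible xs k L = true ↔ M ≤ L) := by
      intro L hmL
      have hL0 : (0:Int) ≤ L := le_trans hmx0 hmL
      have hub : ∀ x ∈ xs, x ≤ L := fun x hx => le_trans (hmx_ub x hx) hmL
      constructor
      · intro hfeas
        obtain ⟨w, j, hj, hw2, hcan, hdiff, h0, h1, hwb⟩ :=
          pvGreedy_to_can xs L hnn hub hL0 xs.length le_rfl
        rw [List.take_length] at hw2 hdiff h0 h1
        rw [pvFeasible_eq, decide_eq_true_iff] at hfeas
        rw [hw2] at hfeas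
        have hCan1 : pvCan xs (w + 1) xs.length L := ⟨j, hj, hcan, by omega⟩
        have hwn : w + 1 ≤ xs.length := by omega
        have hwW : w + 1 ≤ steps + 1 := by
          have hcast : ((w + 1 : Nat) : Int) ≤ (xs.length : Int) := by exact_mod_cast hwn
          have : ((w + 1 : Nat) : Int) ≤ min k (xs.length : Int) := by push_cast at hcast ⊢; omega
          omega
        exact hMle L (pvCan_mono_w xs (w + 1) (steps + 1) xs.length L hL0 hwW hCan1)
      · intro hML
        have hCW : pvCan xs (steps + 1) xs.length L :=
          pvCan_mono_L xs (steps + 1) xs.length M L hMC hML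
        obtain ⟨g0, g1, g2, g3⟩ := pvCan_to_greedy xs L hnn hL0 (steps + 1) xs.length hCW
        rw [List.take_length] at g0 g1 g2 g3
        rw [pvFeasible_eq, decide_eq_true_iff]
        by_cases h2 : 2 ≤ (xs.foldl (pvGstep L) (0, 1)).2
        · have hpos := g3 h2
          rw [if_pos hpos] at g2
          omega
        · omega
    have hA : newspapers_split xs k = M := by
      unfold newspapers_split
      rw [hmax]
      show pvBS xs k m xs.sum (-1) = M
      exact pvBS_thresh xs k M m hthr ((xs.sum + 1 - m).toNat) m xs.sum (-1)
        le_rfl le_rfl hmxM (Or.inl hMS)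
    have hB : newspapers_split_alt xs k = M := by
      unfold newspapers_split_alt
      rw [if_neg hk]
    rw [hA, hB]
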